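-- pv_equiv track=rewrite | github.com/louissxu/42-push_swap | push_swap.py | forward_is_closer
-- ===== SOURCE A (Python) =====
-- def forward_is_closer(list, lower_bound, upper_bound):
--   if lower_bound <= list[0] <= upper_bound:
--     return True
--   i = 1
--   while i < len(list) // 2:
--     if lower_bound <= list[i] <= upper_bound:
--       return True
--     if lower_bound <= list[-i] <= upper_bound:
--       return False
--     i += 1
--
--   # Hmm, there is no number of this value in the search
--   return True
-- ===== SOURCE B (Python) =====
-- def forward_is_closer(list, lower_bound, upper_bound):
--   if lower_bound <= list[0] <= upper_bound:
--     return True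
--   half = len(list) // 2
--   f = next((i for i in range(1, half) if lower_bound <= list[i] <= upper_bound), None)
--   b = next((i for i in range(1, half) if lower_bound <= list[-i] <= upper_bound), None)
--   if f is not None:
--     return b is None or f <= b
--   return b is None
-- ===== Notes on version B (the rewrite author's own statement) =====
-- stated objective: alternative
-- what changed: Replaces A's single interleaved forward/backward race loop (checking list[i] then list[-i] at each step) by two independent first-hit scans over range(1, len//2) plus one summary comparison of the two hit indices.
import Mathlib
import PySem

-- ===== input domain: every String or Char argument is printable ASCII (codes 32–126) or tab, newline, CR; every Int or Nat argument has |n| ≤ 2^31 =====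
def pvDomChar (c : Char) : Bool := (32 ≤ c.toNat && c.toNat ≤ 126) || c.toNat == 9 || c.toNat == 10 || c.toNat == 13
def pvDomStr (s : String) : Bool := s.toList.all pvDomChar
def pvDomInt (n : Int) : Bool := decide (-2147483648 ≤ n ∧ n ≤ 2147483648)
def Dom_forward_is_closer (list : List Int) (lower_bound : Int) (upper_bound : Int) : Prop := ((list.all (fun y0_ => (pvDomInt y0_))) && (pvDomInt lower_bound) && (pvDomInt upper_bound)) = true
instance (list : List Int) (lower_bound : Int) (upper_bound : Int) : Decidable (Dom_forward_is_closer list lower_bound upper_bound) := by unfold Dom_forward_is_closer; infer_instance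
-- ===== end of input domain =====

-- B replaces A's interleaved forward/backward race loop by two independent first-hit
-- scans over range(1, len//2) plus one summary comparison (objective: alternative).

-- ===== PORT A =====
-- lower_bound <= x <= upper_bound
def pvIn (lb ub x : Int) : Bool := decide (lb ≤ x ∧ x ≤ ub)

-- A's while loop; indices i and -i are always in range here (1 ≤ i < len//2), so pyGetD is exact
def pvLoopA (list : List Int) (lb ub : Int) (i : Int) : Bool :=
  if h : i < ((list.length / 2 : Nat) : Int) then
    if pvIn lb ub (PySem.List.pyGetD list i 0) then true
    else if pvIn lb ub (PySem.List.pyGetD list (-i) 0) then false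
    else pvLoopA list lb ub (i + 1)
  else true
termination_by (((list.length / 2 : Nat) : Int) - i).toNat
decreasing_by omega

-- list[0] raises IndexError on []; Pre_ excludes [], so pyGetD is exact here
def forward_is_closer (list : List Int) (lower_bound : Int) (upper_bound : Int) : Bool :=
  if pvIn lower_bound upper_bound (PySem.List.pyGetD list 0 0) then true
  else pvLoopA list lower_bound upper_bound 1

-- ===== PORT B =====
def forward_is_closer_alt (list : List Int) (lower_bound : Int) (upper_bound : Int) : Bool :=
  if pvIn lower_bound upper_bound (PySem.List.pyGetD list 0 0) then true
  else
    let half : Nat := list.length / 2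
    let f := (PySem.List.pyRange 1 (half : Int) 1).find?
               (fun i => pvIn lower_bound upper_bound (PySem.List.pyGetD list i 0))
    let b := (PySem.List.pyRange 1 (half : Int) 1).find?
               (fun i => pvIn lower_bound upper_bound (PySem.List.pyGetD list (-i) 0))
    match f with
    | some fv =>
      match b with
      | none => true
      | some bv => decide (fv ≤ bv)
    | none => b.isNone

-- ===== PRECONDITION & SPEC =====
-- Pre_ excludes the empty list, on which A raises IndexError at list[0] (B raises there too).
def Pre_forward_is_closer (list : List Int) (lower_bound : Int) (upper_bound : Int) : Prop := list ≠ []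
instance (list : List Int) (lower_bound : Int) (upper_bound : Int) : Decidable (Pre_forward_is_closer list lower_bound upper_bound) := by unfold Pre_forward_is_closer; infer_instance
def pvWitness_forward_is_closer : List Int × Int × Int := ([5, 1, 9, 2], 1, 2)

def Spec_forward_is_closer (list : List Int) (lower_bound : Int) (upper_bound : Int) (out : Bool) : Prop := out = forward_is_closer_alt list lower_bound upper_bound
instance (list : List Int) (lower_bound : Int) (upper_bound : Int) (out : Bool) : Decidable (Spec_forward_is_closer list lower_bound upper_bound out) := by unfold Spec_forward_is_closer; infer_instance

-- ===== CLAIM (what is proved, stated in full; the proofs are below) =====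
def Claim_equal_forward_is_closer : Prop := ∀ (list : List Int) (lower_bound : Int) (upper_bound : Int), Dom_forward_is_closer list lower_bound upper_bound → Pre_forward_is_closer list lower_bound upper_bound → Spec_forward_is_closer list lower_bound upper_bound (forward_is_closer list lower_bound upper_bound)

-- ===== LEMMAS AND PROOFS =====

-- B's summary decision as a function of the two first-hit results
def pvSummary (f b : Option Int) : Bool :=
  match f with
  | some fv => match b with | none => true | some bv => decide (fv ≤ bv)
  | none => b.isNone

-- the loop of A equals the two-scan summary over the remaining range [i, len//2)
theorem pvLoopA_eq_summary (list : List Int) (lb ub : Int) (i : Int) :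
    pvLoopA list lb ub i =
      pvSummary
        ((PySem.List.pyRange i ((list.length / 2 : Nat) : Int) 1).find?
          (fun j => pvIn lb ub (PySem.List.pyGetD list j 0)))
        ((PySem.List.pyRange i ((list.length / 2 : Nat) : Int) 1).find?
          (fun j => pvIn lb ub (PySem.List.pyGetD list (-j) 0))) := by
  induction i using pvLoopA.induct (list := list) (lb := lb) (ub := ub) with
  | case1 i h hP =>
    rw [pvLoopA, dif_pos h, if_pos hP, PySem.List.pyRange_one_cons h]
    have hf : List.find? (fun j => pvIn lb ub (PySem.List.pyGetD list j 0))
        (i :: PySem.List.pyRange (i + 1) ((list.length / 2 : Nat) : Int) 1) = some i :=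
      List.find?_cons_of_pos hP
    rw [hf]
    cases hb : List.find? (fun j => pvIn lb ub (PySem.List.pyGetD list (-j) 0))
        (i :: PySem.List.pyRange (i + 1) ((list.length / 2 : Nat) : Int) 1) with
    | none => simp [pvSummary]
    | some bv =>
      have hmem' : bv ∈ i :: PySem.List.pyRange (i + 1) ((list.length / 2 : Nat) : Int) 1 :=
        List.mem_of_find?_eq_some hb
      have hib : i ≤ bv := by
        rcases List.mem_cons.mp hmem' with h1 | h1
        · omega
        · have := (PySem.List.mem_pyRange_one).mp h1; omega
      simp [pvSummary, hib]
  | case2 i h hP hQ =>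
    rw [pvLoopA, dif_pos h, if_neg (by simp [hP]), if_pos hQ, PySem.List.pyRange_one_cons h]
    have hfP : List.find? (fun j => pvIn lb ub (PySem.List.pyGetD list j 0))
        (i :: PySem.List.pyRange (i + 1) ((list.length / 2 : Nat) : Int) 1)
        = List.find? (fun j => pvIn lb ub (PySem.List.pyGetD list j 0))
            (PySem.List.pyRange (i + 1) ((list.length / 2 : Nat) : Int) 1) :=
      List.find?_cons_of_neg (by simpa using hP)
    have hfQ : List.find? (fun j => pvIn lb ub (PySem.List.pyGetD list (-j) 0))
        (i :: PySem.List.pyRange (i + 1) ((list.length / 2 : Nat) : Int) 1) = some i :=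
      List.find?_cons_of_pos hQ
    rw [hfP, hfQ]
    cases hf : List.find? (fun j => pvIn lb ub (PySem.List.pyGetD list j 0))
        (PySem.List.pyRange (i + 1) ((list.length / 2 : Nat) : Int) 1) with
    | none => simp [pvSummary]
    | some fv =>
      have hmem : fv ∈ PySem.List.pyRange (i + 1) ((list.length / 2 : Nat) : Int) 1 :=
        List.mem_of_find?_eq_some hf
      have hfi : ¬ fv ≤ i := by
        have := (PySem.List.mem_pyRange_one).mp hmem; omega
      simp [pvSummary, hfi]
  | case3 i h hP hQ ih =>
    rw [pvLoopA, dif_pos h, if_neg (by simp [hP]), if_neg (by simp [hQ]),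
      PySem.List.pyRange_one_cons h]
    have hfP : List.find? (fun j => pvIn lb ub (PySem.List.pyGetD list j 0))
        (i :: PySem.List.pyRange (i + 1) ((list.length / 2 : Nat) : Int) 1)
        = List.find? (fun j => pvIn lb ub (PySem.List.pyGetD list j 0))
            (PySem.List.pyRange (i + 1) ((list.length / 2 : Nat) : Int) 1) :=
      List.find?_cons_of_neg (by simpa using hP)
    have hfQ : List.find? (fun j => pvIn lb ub (PySem.List.pyGetD list (-j) 0))
        (i :: PySem.List.pyRange (i + 1) ((list.length / 2 : Nat) : Int) 1)
        = List.find? (fun j => pvIn lb ub (PySem.List.pyGetD list (-j) 0))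
            (PySem.List.pyRange (i + 1) ((list.length / 2 : Nat) : Int) 1) :=
      List.find?_cons_of_neg (by simpa using hQ)
    rw [hfP, hfQ]
    exact ih
  | case4 i h =>
    rw [pvLoopA, dif_neg h, PySem.List.pyRange_one_eq_nil (by omega)]
    simp [pvSummary]

-- ===== VERDICT (by name: the statement is the Claim_ definition above) =====
theorem forward_is_closer_spec : Claim_equal_forward_is_closer := by
  intro list lb ub _ _
  unfold Spec_forward_is_closer forward_is_closer forward_is_closer_alt
  by_cases h0 : pvIn lb ub (PySem.List.pyGetD list 0 0)
  · simp [h0]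
  · simp only [if_neg h0]
    rw [pvLoopA_eq_summary]
    rfl
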